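-- pv_equiv track=rewrite | github.com/cxxCoolStar/ai-ops | ai_ops/core/orchestrator.py | _candidate_rel_paths
-- ===== SOURCE A (Python) =====
-- def _candidate_rel_paths(rel_path):
--     s = (rel_path or "").strip().replace("\\", "/").lstrip("/").strip()
--     if not s:
--         return []
--     candidates = []
--     cur = s
--     while cur and cur not in candidates:
--         candidates.append(cur)
--         if "/" not in cur:
--             break
--         cur = cur.split("/", 1)[-1]
--     return candidates
-- ===== SOURCE B (Python) =====
-- def _candidate_rel_paths(rel_path):
--     s = (rel_path or "").strip().replace("\\", "/").lstrip("/").strip()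
--     if not s:
--         return []
--     parts = s.split("/")
--     result = []
--     for i in range(len(parts)):
--         suf = "/".join(parts[i:])
--         if not suf:
--             break
--         result.append(suf)
--     return result
-- ===== Notes on version B (the rewrite author's own statement) =====
-- stated objective: idiomatic
-- what changed: B splits the normalized path into its segments once and builds each candidate by joining a suffix slice of the segment list, instead of A's loop that repeatedly splits off the first segment of the current string and keeps a dead membership check against the accumulator.
import Mathlib
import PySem

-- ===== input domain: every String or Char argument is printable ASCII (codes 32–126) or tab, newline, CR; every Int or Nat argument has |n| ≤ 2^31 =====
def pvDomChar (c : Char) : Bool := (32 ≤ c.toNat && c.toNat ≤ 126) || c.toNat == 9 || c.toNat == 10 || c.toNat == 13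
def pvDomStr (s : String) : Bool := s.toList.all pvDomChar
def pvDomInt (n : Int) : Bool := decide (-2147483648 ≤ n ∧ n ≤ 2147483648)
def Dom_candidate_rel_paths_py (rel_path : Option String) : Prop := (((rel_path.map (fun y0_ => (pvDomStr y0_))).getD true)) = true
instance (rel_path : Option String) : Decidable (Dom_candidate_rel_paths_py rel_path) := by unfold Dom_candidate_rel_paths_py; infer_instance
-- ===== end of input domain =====

-- B re-implements A by splitting the normalized path into its segments once and joining a
-- suffix slice of the segment list per candidate, instead of A's loop that repeatedly splits
-- off the first segment of the current string and keeps a dead membership check; same cost, plainer (objective: idiomatic).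

-- Python `s.lstrip("/")`: drop leading characters belonging to the strip set
-- (exact; PySem has no lstrip-with-chars primitive, so this line is ported by hand)
def pvLstripSlash (s : List Char) : List Char := List.dropWhile (fun c => (['/'] : List Char).contains c) s

-- shared normalization (identical in both Pythons): (rel_path or "").strip().replace("\\", "/").lstrip("/").strip()
def pvNorm (rel_path : Option String) : List Char :=
  PySem.Chars.strip (pvLstripSlash (PySem.Chars.replace (PySem.Chars.strip (rel_path.getD "").toList) ['\\'] ['/']))

-- helper lemmas cited by port A's termination proof: reading `"/" in cur`, and that
-- `cur.split("/", 1)[-1]` is strictly shorter than cur when cur contains '/'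
theorem pvIsIn_slash_iff (l : List Char) : PySem.Chars.isIn ['/'] l = true ↔ '/' ∈ l := by
  rw [PySem.Chars.isIn_iff_infix]
  constructor
  · intro h; exact h.sublist.subset (by simp)
  · intro h
    rcases List.append_of_mem h with ⟨s, t, rfl⟩
    exact ⟨s, t, by simp⟩

theorem pvGoM0 (d : Char) (fuel : Nat) (l : List Char) (acc : List (List Char)) :
    PySem.Chars.splitOnMax.go [d] fuel 0 l [] acc = (l :: acc).reverse := by
  cases fuel with
  | zero => rw [PySem.Chars.splitOnMax.go]; simp
  | succ fuel =>
    cases l with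
    | nil => rw [PySem.Chars.splitOnMax.go]; simp; omega
    | cons c rest => rw [PySem.Chars.splitOnMax.go]; simp

theorem pvGoM1 (d : Char) (fuel : Nat) : ∀ (l cur : List Char) (acc : List (List Char)),
    l.length < fuel → d ∈ l →
    PySem.Chars.splitOnMax.go [d] fuel 1 l cur acc =
      acc.reverse ++ [cur.reverse ++ l.takeWhile (· ≠ d), (l.dropWhile (· ≠ d)).tail] := by
  induction fuel with
  | zero => intro l cur acc h _; omega
  | succ fuel ih =>
    intro l cur acc h hm
    cases l with
    | nil => simp at hm
    | cons c rest =>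
      rw [PySem.Chars.splitOnMax.go]
      by_cases hc : c = d
      · subst hc
        have hp : ([c] : List Char).isPrefixOf (c :: rest) = true := by simp [List.isPrefixOf]
        simp only [if_neg (by omega : ¬ (1:Nat) = 0), if_pos hp]
        rw [show (1:Nat) - 1 = 0 from rfl]
        rw [pvGoM0]
        simp
      · have hp : ¬ (([d] : List Char).isPrefixOf (c :: rest) = true) := by
          simp [List.isPrefixOf]; exact fun e => hc e.symm
        have hm' : d ∈ rest := (List.mem_cons.mp hm).resolve_left (fun e => hc e.symm)
        simp only [if_neg (by omega : ¬ (1:Nat) = 0), if_neg hp]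
        rw [ih rest (c :: cur) acc (by simpa using h) hm']
        simp [hc]

theorem pvDecomp (cur : List Char) (h : '/' ∈ cur) :
    cur = cur.takeWhile (· ≠ '/') ++ '/' :: (cur.dropWhile (· ≠ '/')).tail := by
  induction cur with
  | nil => simp at h
  | cons c rest ih =>
    by_cases hc : c = '/'
    · subst hc; simp [List.takeWhile, List.dropWhile]
    · have : '/' ∈ rest := (List.mem_cons.mp h).resolve_left (fun e => hc e.symm)
      simpa [hc] using congrArg (c :: ·) (ih this)

theorem pvSplitTail_eq (cur : List Char) (h : '/' ∈ cur) :
    ((PySem.List.pyGet? ((PySem.Chars.splitMax? cur ['/'] 1).getD []) (-1)).getD []) =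
      (cur.dropWhile (· ≠ '/')).tail := by
  have e1 : PySem.Chars.splitMax? cur ['/'] 1 = some (PySem.Chars.splitOnMax cur ['/'] 1) := by
    simp [PySem.Chars.splitMax?]
  rw [e1]
  rw [PySem.Chars.splitOnMax, if_neg (by decide)]
  simp only [Int.toNat_one]
  rw [pvGoM1 '/' (cur.length+1) cur [] [] (by omega) h]
  simp [PySem.List.pyGet?, PySem.List.pyIdx?]

theorem pvSplitTail_lt (cur : List Char) (h : '/' ∈ cur) :
    ((PySem.List.pyGet? ((PySem.Chars.splitMax? cur ['/'] 1).getD []) (-1)).getD []).length < cur.length := by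
  rw [pvSplitTail_eq cur h]
  have := congrArg List.length (pvDecomp cur h)
  simp only [List.length_append, List.length_cons] at this
  omega

-- ===== PORT A =====
-- while cur and cur not in candidates: append cur; break if no separator; else drop the first segment
def pvALoop (cur : List Char) (cands : List (List Char)) : List (List Char) :=
  if cur = [] then cands
  else if cands.contains cur then cands
  else
    let cands' := cands ++ [cur]
    if h2 : PySem.Chars.isIn ['/'] cur then
      pvALoop ((PySem.List.pyGet? ((PySem.Chars.splitMax? cur ['/'] 1).getD []) (-1)).getD []) cands'
    else cands'
termination_by cur.length
decreasing_by exact pvSplitTail_lt cur ((pvIsIn_slash_iff cur).mp h2)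

def candidate_rel_paths_py (rel_path : Option String) : List String :=
  let s := pvNorm rel_path
  if s = [] then []
  else (pvALoop s []).map (fun l => String.ofList l)

-- ===== PORT B =====
-- for i in range(len(parts)): suf = join of parts[i:]; break if empty, else append
def pvBGo (parts : List (List Char)) : List (List Char) :=
  match parts with
  | [] => []
  | p :: ps =>
    let suf := PySem.Chars.join ['/'] (p :: ps)
    if suf = [] then [] else suf :: pvBGo ps

def candidate_rel_paths_py_alt (rel_path : Option String) : List String :=
  let s := pvNorm rel_path
  if s = [] then []
  else (pvBGo (PySem.Chars.splitOn s ['/'])).map (fun l => String.ofList l)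

-- ===== PRECONDITION & SPEC =====
def Spec_candidate_rel_paths_py (rel_path : Option String) (out : List String) : Prop := out = candidate_rel_paths_py_alt rel_path
instance (rel_path : Option String) (out : List String) : Decidable (Spec_candidate_rel_paths_py rel_path out) := by unfold Spec_candidate_rel_paths_py; infer_instance

-- ===== CLAIM (what is proved, stated in full; the proofs are below) =====
def Claim_equal_candidate_rel_paths_py : Prop := ∀ (rel_path : Option String), Dom_candidate_rel_paths_py rel_path → Spec_candidate_rel_paths_py rel_path (candidate_rel_paths_py rel_path)

-- ===== LEMMAS AND PROOFS =====

-- reference single-character split, used only by the proofs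
def pvSplit (d : Char) : List Char → List (List Char)
  | [] => [[]]
  | c :: rest => if c = d then [] :: pvSplit d rest else (pvSplit d rest).modifyHead (fun x => c :: x)

theorem pvSplit_ne_nil (d : Char) (l : List Char) : pvSplit d l ≠ [] := by
  induction l with
  | nil => simp [pvSplit]
  | cons c rest ih =>
    simp only [pvSplit]
    split
    · simp
    · rcases h : pvSplit d rest with _ | ⟨m, ms⟩
      · exact absurd h ih
      · simp

theorem pvSplit_no (d : Char) (l : List Char) (h : d ∉ l) : pvSplit d l = [l] := by
  induction l with
  | nil => simp [pvSplit]
  | cons c rest ih =>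
    have hc : ¬ c = d := fun e => h (by simp [e])
    have : d ∉ rest := fun m => h (by simp [m])
    simp [pvSplit, hc, ih this]

theorem pvSplit_first (l : List Char) (h : '/' ∈ l) :
    pvSplit '/' l = l.takeWhile (· ≠ '/') :: pvSplit '/' ((l.dropWhile (· ≠ '/')).tail) := by
  induction l with
  | nil => simp at h
  | cons c rest ih =>
    by_cases hc : c = '/'
    · subst hc; simp [pvSplit]
    · have hm : '/' ∈ rest := (List.mem_cons.mp h).resolve_left (fun e => hc e.symm)
      simp [pvSplit, hc, ih hm]

theorem pvJoin_pvSplit (l : List Char) : PySem.Chars.join ['/'] (pvSplit '/' l) = l := by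
  induction l with
  | nil => simp [pvSplit, PySem.Chars.join, List.intercalate]
  | cons c rest ih =>
    by_cases hc : c = '/'
    · subst hc
      rcases h : pvSplit '/' rest with _ | ⟨m, ms⟩
      · exact absurd h (pvSplit_ne_nil _ _)
      · have e : pvSplit '/' ('/' :: rest) = [] :: pvSplit '/' rest := by simp [pvSplit]
        rw [e, h, PySem.Chars.join_cons_cons, ← h, ih]; simp
    · rcases h : pvSplit '/' rest with _ | ⟨m, ms⟩
      · exact absurd h (pvSplit_ne_nil _ _)
      · have e : pvSplit '/' (c :: rest) = (c :: m) :: ms := by simp [pvSplit, hc, h]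
        rw [e]
        cases ms with
        | nil =>
          rw [h] at ih
          simp [PySem.Chars.join, List.intercalate] at ih ⊢
          simp [ih]
        | cons m2 ms' =>
          rw [PySem.Chars.join_cons_cons]
          rw [h, PySem.Chars.join_cons_cons] at ih
          simp [← ih]

theorem pvGoS (d : Char) (fuel : Nat) : ∀ (l cur : List Char) (acc : List (List Char)), l.length < fuel →
    PySem.Chars.splitOn.go [d] fuel l cur acc =
      acc.reverse ++ List.modifyHead (fun x => cur.reverse ++ x) (pvSplit d l) := by
  induction fuel with
  | zero => intro l cur acc h; omega
  | succ fuel ih =>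
    intro l cur acc h
    cases l with
    | nil =>
      rw [PySem.Chars.splitOn.go]
      simp [pvSplit]
      omega
    | cons c rest =>
      rw [PySem.Chars.splitOn.go]
      by_cases hc : c = d
      · subst hc
        have hp : ([c] : List Char).isPrefixOf (c :: rest) = true := by simp [List.isPrefixOf]
        rw [if_pos hp, ih _ _ _ (by simpa using h)]
        rcases hs : pvSplit c rest with _ | ⟨m, ms⟩
        · exact absurd hs (pvSplit_ne_nil _ _)
        · simp [pvSplit, hs]
      · have hp : ¬ (([d] : List Char).isPrefixOf (c :: rest) = true) := by
          simp [List.isPrefixOf]; exact fun e => hc e.symm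
        rw [if_neg hp, ih _ _ _ (by simpa using h)]
        rcases hs : pvSplit d rest with _ | ⟨m, ms⟩
        · exact absurd hs (pvSplit_ne_nil _ _)
        · simp [pvSplit, hc, hs]

theorem pvSplitOn_eq (l : List Char) : PySem.Chars.splitOn l ['/'] = pvSplit '/' l := by
  rw [PySem.Chars.splitOn, pvGoS '/' (l.length+1) l [] [] (by omega)]
  rcases hs : pvSplit '/' l with _ | ⟨m, ms⟩
  · exact absurd hs (pvSplit_ne_nil _ _)
  · simp

theorem pvBGo_nilpart : pvBGo [[]] = [] := by
  simp [pvBGo, PySem.Chars.join, List.intercalate]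

theorem pvALoop_eq (n : Nat) : ∀ (cur : List Char) (cands : List (List Char)),
    cur.length ≤ n → (∀ x ∈ cands, cur.length < x.length) →
    pvALoop cur cands = cands ++ pvBGo (pvSplit '/' cur) := by
  induction n with
  | zero =>
    intro cur cands hn _
    have : cur = [] := by cases cur <;> simp_all
    subst this
    rw [pvALoop]
    simp [pvSplit, pvBGo_nilpart]
  | succ n ih =>
    intro cur cands hn hinv
    by_cases hnil : cur = []
    · subst hnil; rw [pvALoop]; simp [pvSplit, pvBGo_nilpart]
    · have hcont : cands.contains cur = false := by
        cases hb : cands.contains cur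
        · rfl
        · exact absurd (hinv cur (by simpa using hb)) (lt_irrefl _)
      rw [pvALoop, if_neg hnil, hcont]
      by_cases hm : '/' ∈ cur
      · have hin : PySem.Chars.isIn ['/'] cur = true := (pvIsIn_slash_iff cur).mpr hm
        rw [dif_pos hin, pvSplitTail_eq cur hm]
        have hlen : ((cur.dropWhile (· ≠ '/')).tail).length < cur.length := by
          have := congrArg List.length (pvDecomp cur hm)
          simp only [List.length_append, List.length_cons] at this
          omega
        rw [ih _ (cands ++ [cur]) (by omega) ?inv]
        case inv =>
          intro x hx
          rcases List.mem_append.mp hx with hx | hx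
          · exact lt_trans hlen (hinv x hx)
          · simp at hx; subst hx; exact hlen
        have hb : pvBGo (pvSplit '/' cur) =
            cur :: pvBGo (pvSplit '/' ((cur.dropWhile (· ≠ '/')).tail)) := by
          rw [pvSplit_first cur hm, pvBGo]
          rw [← pvSplit_first cur hm, pvJoin_pvSplit]
          simp [hnil]
        rw [hb]; simp
      · have hin : PySem.Chars.isIn ['/'] cur = false := by
          cases hb : PySem.Chars.isIn ['/'] cur
          · rfl
          · exact absurd ((pvIsIn_slash_iff cur).mp hb) hm
        rw [dif_neg (by simp [hin])]
        rw [pvSplit_no '/' cur hm, pvBGo, pvBGo]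
        simp [PySem.Chars.join_singleton, hnil]

-- ===== VERDICT (by name: the statement is the Claim_ definition above) =====
theorem candidate_rel_paths_py_spec : Claim_equal_candidate_rel_paths_py := by
  intro rel_path _
  unfold Spec_candidate_rel_paths_py candidate_rel_paths_py candidate_rel_paths_py_alt
  by_cases hs : pvNorm rel_path = []
  · simp [hs]
  · simp only [if_neg hs]
    rw [pvSplitOn_eq, pvALoop_eq (pvNorm rel_path).length _ [] le_rfl (by simp)]
    simp
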